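-- pv_equiv track=rewrite | github.com/SaiSrichandra/Vectorization-of-Python-Programs | python leetcode/progs (12757).py | diagnoal_verify
-- ===== SOURCE A (Python) =====
-- def diagnoal_verify(board, row, col):
--     i = row
--     j = col
--     n = len(board[0])
--     while i >= 0 and j >= 0:
--         if board[i][j] == 'Q':
--             return False
--         i -= 1
--         j -= 1
--     i = row
--     j = col
--     while i < n and j < n:
--         if board[i][j] == 'Q':
--             return False
--         i += 1
--         j += 1
--     i = row
--     j = col
--     while i < n and j >= 0:
--         if board[i][j] == 'Q':
--             return False
--         i += 1
--         j -= 1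
--     i = row
--     j = col
--     while i >= 0 and j < n:
--         if board[i][j] == 'Q':
--             return False
--         i -= 1
--         j += 1
--     return True
-- ===== SOURCE B (Python) =====
-- def diagnoal_verify(board, row, col):
--     n = len(board[0])
--     k = 0
--     while True:
--         arms = []
--         if row - k >= 0 and col - k >= 0:
--             arms.append((row - k, col - k))
--         if row + k < n and col + k < n:
--             arms.append((row + k, col + k))
--         if row + k < n and col - k >= 0:
--             arms.append((row + k, col - k))
--         if row - k >= 0 and col + k < n:
--             arms.append((row - k, col + k))
--         if not arms:
--             return True
--         if any(board[i][j] == 'Q' for i, j in arms):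
--             return False
--         k += 1
-- ===== Notes on version B (the rewrite author's own statement) =====
-- stated objective: alternative
-- what changed: Replaces A's four sequential directional while-walks with a single concentric-distance sweep: one loop over the offset k that probes all four diagonal arms still on the board at distance k and stops when no arm remains.
-- outside the precondition, e.g. on diagnoal_verify(['Q...', '....', '....', 'x'], 2, 2): A returns False, B raises IndexError; on diagnoal_verify(['Q..', '..'], 1, 1): A returns False, B returns False
import Mathlib
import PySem

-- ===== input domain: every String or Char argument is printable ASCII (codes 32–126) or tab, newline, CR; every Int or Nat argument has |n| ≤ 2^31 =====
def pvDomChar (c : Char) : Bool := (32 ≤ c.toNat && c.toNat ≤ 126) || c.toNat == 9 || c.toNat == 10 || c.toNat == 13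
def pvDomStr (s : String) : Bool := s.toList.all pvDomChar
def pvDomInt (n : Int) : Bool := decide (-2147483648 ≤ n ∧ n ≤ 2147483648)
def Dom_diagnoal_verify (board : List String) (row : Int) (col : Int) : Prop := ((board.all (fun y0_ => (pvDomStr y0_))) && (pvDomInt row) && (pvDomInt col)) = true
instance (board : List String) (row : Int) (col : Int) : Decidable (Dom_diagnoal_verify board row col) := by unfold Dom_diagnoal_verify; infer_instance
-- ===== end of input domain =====

-- B replaces A's four sequential directional while-walks with a single concentric-distance sweep:
-- one loop over the offset k probing the four diagonal arms still on the board at distance k,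
-- stopping when no arm remains.

-- ===== PORT A =====
-- board[i][j] == 'Q' with Python indexing (false also where Python would raise; Pre_ keeps A's accesses in range)
def dvCellQ (board : List String) (i j : Int) : Bool :=
  match PySem.List.pyGet? board i with
  | some s => PySem.Str.pyGet? s j == some 'Q'
  | none => false

-- while i >= 0 and j >= 0: …; i -= 1; j -= 1
def dvLoop1 (board : List String) (i j : Int) : Bool :=
  if h : 0 ≤ i ∧ 0 ≤ j then
    if dvCellQ board i j then false
    else dvLoop1 board (i - 1) (j - 1)
  else true
termination_by (i + 1).toNat
decreasing_by omega

-- while i < n and j < n: …; i += 1; j += 1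
def dvLoop2 (board : List String) (n i j : Int) : Bool :=
  if h : i < n ∧ j < n then
    if dvCellQ board i j then false
    else dvLoop2 board n (i + 1) (j + 1)
  else true
termination_by (n - i).toNat
decreasing_by omega

-- while i < n and j >= 0: …; i += 1; j -= 1
def dvLoop3 (board : List String) (n i j : Int) : Bool :=
  if h : i < n ∧ 0 ≤ j then
    if dvCellQ board i j then false
    else dvLoop3 board n (i + 1) (j - 1)
  else true
termination_by (n - i).toNat
decreasing_by omega

-- while i >= 0 and j < n: …; i -= 1; j += 1
def dvLoop4 (board : List String) (n i j : Int) : Bool :=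
  if h : 0 ≤ i ∧ j < n then
    if dvCellQ board i j then false
    else dvLoop4 board n (i - 1) (j + 1)
  else true
termination_by (i + 1).toNat
decreasing_by omega

def diagnoal_verify (board : List String) (row : Int) (col : Int) : Bool :=
  let n : Int := PySem.Str.len (board.headD "")   -- len(board[0]); Pre_ excludes the empty board
  dvLoop1 board row col &&
    (dvLoop2 board n row col && (dvLoop3 board n row col && dvLoop4 board n row col))

-- ===== PORT B =====
-- the arms list built at distance k (same four guards, in Source B's order)
def dvArms (n row col k : Int) : List (Int × Int) :=
  (if 0 ≤ row - k ∧ 0 ≤ col - k then [(row - k, col - k)] else []) ++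
  (if row + k < n ∧ col + k < n then [(row + k, col + k)] else []) ++
  (if row + k < n ∧ 0 ≤ col - k then [(row + k, col - k)] else []) ++
  (if 0 ≤ row - k ∧ col + k < n then [(row - k, col + k)] else [])

-- while True: build arms; if empty return True; if any arm holds 'Q' return False; k += 1
-- (fuel is only a totality guard: diagnoal_verify_alt passes more fuel than the sweep can use,
-- since every arm has left the board once k exceeds |row| + |col| + |n|)
def dvSweep (board : List String) (n row col : Int) : Nat → Int → Bool
  | 0, _ => true
  | fuel + 1, k =>
      if dvArms n row col k = [] then true
      else if (dvArms n row col k).any (fun c => dvCellQ board c.1 c.2) then false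
      else dvSweep board n row col fuel (k + 1)

def diagnoal_verify_alt (board : List String) (row : Int) (col : Int) : Bool :=
  let n : Int := PySem.Str.len (board.headD "")
  dvSweep board n row col (row.natAbs + col.natAbs + n.natAbs + 1) 0

-- ===== PRECONDITION & SPEC =====
-- board[i] and board[i][j] are valid Python indexings (negative indices allowed, as in Python)
def dvValid (board : List String) (i j : Int) : Bool :=
  match PySem.List.pyGet? board i with
  | some s => (PySem.Str.pyGet? s j).isSome
  | none => false

-- Pre_ excludes the inputs on which A raises (empty board, invalid start cell, or an invalid
-- index met along the four diagonal walks), EXCEPT that a queen on the start cell always stays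
-- inside Pre_ (both programs answer False there before any further access).  This is slightly
-- narrower than "A returns": when a later cell of a walk is an invalid index, whether A returns
-- False or raises IndexError depends on where queens sit along the walk, which a closed-form
-- precondition cannot trace — such inputs are excluded even when A happens to return (see cites).
def Pre_diagnoal_verify (board : List String) (row : Int) (col : Int) : Prop :=
  board ≠ [] ∧ dvValid board row col = true ∧
  (dvCellQ board row col = true ∨
    ((∀ k ∈ PySem.List.pyRange 0 (min row col + 1), dvValid board (row - k) (col - k) = true) ∧
     (∀ k ∈ PySem.List.pyRange 0 (PySem.Str.len (board.headD "") - max row col), dvValid board (row + k) (col + k) = true) ∧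
     (∀ k ∈ PySem.List.pyRange 0 (min (PySem.Str.len (board.headD "") - row) (col + 1)), dvValid board (row + k) (col - k) = true) ∧
     (∀ k ∈ PySem.List.pyRange 0 (min (row + 1) (PySem.Str.len (board.headD "") - col)), dvValid board (row - k) (col + k) = true)))

instance (board : List String) (row : Int) (col : Int) : Decidable (Pre_diagnoal_verify board row col) := by
  unfold Pre_diagnoal_verify; infer_instance

def pvWitness_diagnoal_verify : List String × Int × Int := (["..", "Q."], 0, 1)

def Spec_diagnoal_verify (board : List String) (row : Int) (col : Int) (out : Bool) : Prop := out = diagnoal_verify_alt board row col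
instance (board : List String) (row : Int) (col : Int) (out : Bool) : Decidable (Spec_diagnoal_verify board row col out) := by unfold Spec_diagnoal_verify; infer_instance

-- ===== CLAIM (what is proved, stated in full; the proofs are below) =====
def Claim_equal_diagnoal_verify : Prop := ∀ (board : List String) (row : Int) (col : Int), Dom_diagnoal_verify board row col → Pre_diagnoal_verify board row col → Spec_diagnoal_verify board row col (diagnoal_verify board row col)

-- ===== LEMMAS AND PROOFS =====

-- some arm is still on the board at distance k, i.e. Source B's 'arms' is nonempty (proof helper)
def dvGuard (n row col k : Int) : Prop :=
  (0 ≤ row - k ∧ 0 ≤ col - k) ∨ (row + k < n ∧ col + k < n) ∨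
  (row + k < n ∧ 0 ≤ col - k) ∨ (0 ≤ row - k ∧ col + k < n)

lemma dvLoop1_false_iff (board : List String) (i j : Int) :
    dvLoop1 board i j = false ↔
      ∃ k : Nat, 0 ≤ i - k ∧ 0 ≤ j - k ∧ dvCellQ board (i - k) (j - k) = true := by
  fun_induction dvLoop1 board i j with
  | case1 i j h hq =>
      exact ⟨fun _ => ⟨0, by omega, by omega, by simpa using hq⟩, fun _ => rfl⟩
  | case2 i j h hq ih =>
      simp only [ih]
      constructor
      · rintro ⟨k, h1, h2, h3⟩
        exact ⟨k + 1, by push_cast; omega, by push_cast; omega, by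
          convert h3 using 2 <;> push_cast <;> ring⟩
      · rintro ⟨k, h1, h2, h3⟩
        match k with
        | 0 => simp at h3; rw [h3] at hq; exact absurd hq (by simp)
        | k + 1 =>
          exact ⟨k, by push_cast at h1 ⊢; omega, by push_cast at h2 ⊢; omega, by
            convert h3 using 2 <;> push_cast <;> ring⟩
  | case3 i j h =>
      simp only [Bool.true_eq_false, false_iff]
      rintro ⟨k, h1, h2, _⟩
      have : (0:Int) ≤ k := Int.natCast_nonneg k
      omega

lemma dvLoop2_false_iff (board : List String) (n i j : Int) :
    dvLoop2 board n i j = false ↔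
      ∃ k : Nat, i + k < n ∧ j + k < n ∧ dvCellQ board (i + k) (j + k) = true := by
  fun_induction dvLoop2 board n i j with
  | case1 i j h hq =>
      exact ⟨fun _ => ⟨0, by omega, by omega, by simpa using hq⟩, fun _ => rfl⟩
  | case2 i j h hq ih =>
      simp only [ih]
      constructor
      · rintro ⟨k, h1, h2, h3⟩
        exact ⟨k + 1, by push_cast; omega, by push_cast; omega, by
          convert h3 using 2 <;> push_cast <;> ring⟩
      · rintro ⟨k, h1, h2, h3⟩
        match k with
        | 0 => simp at h3; rw [h3] at hq; exact absurd hq (by simp)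
        | k + 1 =>
          exact ⟨k, by push_cast at h1 ⊢; omega, by push_cast at h2 ⊢; omega, by
            convert h3 using 2 <;> push_cast <;> ring⟩
  | case3 i j h =>
      simp only [Bool.true_eq_false, false_iff]
      rintro ⟨k, h1, h2, _⟩
      have : (0:Int) ≤ k := Int.natCast_nonneg k
      omega

lemma dvLoop3_false_iff (board : List String) (n i j : Int) :
    dvLoop3 board n i j = false ↔
      ∃ k : Nat, i + k < n ∧ 0 ≤ j - k ∧ dvCellQ board (i + k) (j - k) = true := by
  fun_induction dvLoop3 board n i j with
  | case1 i j h hq =>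
      exact ⟨fun _ => ⟨0, by omega, by omega, by simpa using hq⟩, fun _ => rfl⟩
  | case2 i j h hq ih =>
      simp only [ih]
      constructor
      · rintro ⟨k, h1, h2, h3⟩
        exact ⟨k + 1, by push_cast; omega, by push_cast; omega, by
          convert h3 using 2 <;> push_cast <;> ring⟩
      · rintro ⟨k, h1, h2, h3⟩
        match k with
        | 0 => simp at h3; rw [h3] at hq; exact absurd hq (by simp)
        | k + 1 =>
          exact ⟨k, by push_cast at h1 ⊢; omega, by push_cast at h2 ⊢; omega, by
            convert h3 using 2 <;> push_cast <;> ring⟩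
  | case3 i j h =>
      simp only [Bool.true_eq_false, false_iff]
      rintro ⟨k, h1, h2, _⟩
      have : (0:Int) ≤ k := Int.natCast_nonneg k
      omega

lemma dvLoop4_false_iff (board : List String) (n i j : Int) :
    dvLoop4 board n i j = false ↔
      ∃ k : Nat, 0 ≤ i - k ∧ j + k < n ∧ dvCellQ board (i - k) (j + k) = true := by
  fun_induction dvLoop4 board n i j with
  | case1 i j h hq =>
      exact ⟨fun _ => ⟨0, by omega, by omega, by simpa using hq⟩, fun _ => rfl⟩
  | case2 i j h hq ih =>
      simp only [ih]
      constructor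
      · rintro ⟨k, h1, h2, h3⟩
        exact ⟨k + 1, by push_cast; omega, by push_cast; omega, by
          convert h3 using 2 <;> push_cast <;> ring⟩
      · rintro ⟨k, h1, h2, h3⟩
        match k with
        | 0 => simp at h3; rw [h3] at hq; exact absurd hq (by simp)
        | k + 1 =>
          exact ⟨k, by push_cast at h1 ⊢; omega, by push_cast at h2 ⊢; omega, by
            convert h3 using 2 <;> push_cast <;> ring⟩
  | case3 i j h =>
      simp only [Bool.true_eq_false, false_iff]
      rintro ⟨k, h1, h2, _⟩
      have : (0:Int) ≤ k := Int.natCast_nonneg k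
      omega

lemma dvA_false_iff (board : List String) (row col : Int) :
    diagnoal_verify board row col = false ↔
      (dvLoop1 board row col = false ∨
       dvLoop2 board (PySem.Str.len (board.headD "")) row col = false ∨
       dvLoop3 board (PySem.Str.len (board.headD "")) row col = false ∨
       dvLoop4 board (PySem.Str.len (board.headD "")) row col = false) := by
  simp only [diagnoal_verify]
  generalize dvLoop1 board row col = l1
  generalize dvLoop2 board (PySem.Str.len (board.headD "")) row col = l2
  generalize dvLoop3 board (PySem.Str.len (board.headD "")) row col = l3
  generalize dvLoop4 board (PySem.Str.len (board.headD "")) row col = l4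
  cases l1 <;> cases l2 <;> cases l3 <;> cases l4 <;> simp

-- membership in the arms list, one introduction lemma per arm and one elimination lemma
lemma dvArms_mem1 (n row col k : Int) (h : 0 ≤ row - k ∧ 0 ≤ col - k) :
    (row - k, col - k) ∈ dvArms n row col k := by
  unfold dvArms; rw [if_pos h]; simp

lemma dvArms_mem2 (n row col k : Int) (h : row + k < n ∧ col + k < n) :
    (row + k, col + k) ∈ dvArms n row col k := by
  unfold dvArms; rw [if_pos h]; simp

lemma dvArms_mem3 (n row col k : Int) (h : row + k < n ∧ 0 ≤ col - k) :
    (row + k, col - k) ∈ dvArms n row col k := by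
  unfold dvArms; rw [if_pos h]; simp

lemma dvArms_mem4 (n row col k : Int) (h : 0 ≤ row - k ∧ col + k < n) :
    (row - k, col + k) ∈ dvArms n row col k := by
  unfold dvArms; rw [if_pos h]; simp

lemma dvArms_mem_elim (n row col k a b : Int) (h : (a, b) ∈ dvArms n row col k) :
    ((0 ≤ row - k ∧ 0 ≤ col - k) ∧ a = row - k ∧ b = col - k) ∨
    ((row + k < n ∧ col + k < n) ∧ a = row + k ∧ b = col + k) ∨
    ((row + k < n ∧ 0 ≤ col - k) ∧ a = row + k ∧ b = col - k) ∨
    ((0 ≤ row - k ∧ col + k < n) ∧ a = row - k ∧ b = col + k) := by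
  unfold dvArms at h
  split_ifs at h <;> simp_all <;> tauto

lemma dvArms_ne_nil_iff (n row col k : Int) :
    dvArms n row col k ≠ [] ↔ dvGuard n row col k := by
  unfold dvArms dvGuard
  split_ifs <;> simp_all

-- the guard is downward closed in the distance
lemma dvGuard_anti (n row col k k' : Int) (hle : k' ≤ k) (h : dvGuard n row col k) :
    dvGuard n row col k' := by
  unfold dvGuard at h ⊢; omega

-- an active arm bounds the distance (fuel sufficiency)
lemma dvGuard_bound (n row col k : Int) (h : dvGuard n row col k) :
    k < (row.natAbs : Int) + col.natAbs + n.natAbs + 1 := by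
  unfold dvGuard at h; omega

lemma dvSweep_false_iff (board : List String) (n row col : Int) (fuel : Nat) (k0 : Int)
    (hf : ∀ j : Nat, dvGuard n row col (k0 + j) → j < fuel) :
    dvSweep board n row col fuel k0 = false ↔
      ∃ j : Nat, dvGuard n row col (k0 + j) ∧
        (dvArms n row col (k0 + j)).any (fun c => dvCellQ board c.1 c.2) = true := by
  induction fuel generalizing k0 with
  | zero =>
      simp only [dvSweep, Bool.true_eq_false, false_iff]
      rintro ⟨j, hg, _⟩
      exact absurd (hf j hg) (by omega)
  | succ fuel ih =>
      simp only [dvSweep]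
      by_cases he : dvArms n row col k0 = []
      · rw [if_pos he]
        simp only [Bool.true_eq_false, false_iff]
        rintro ⟨j, hg, _⟩
        exact ((dvArms_ne_nil_iff n row col k0).mpr
          (dvGuard_anti n row col (k0 + j) k0 (by omega) hg)) he
      · rw [if_neg he]
        by_cases hq : (dvArms n row col k0).any (fun c => dvCellQ board c.1 c.2) = true
        · rw [if_pos hq]
          refine ⟨fun _ => ⟨0, ?_, by simpa using hq⟩, fun _ => rfl⟩
          simpa using (dvArms_ne_nil_iff n row col k0).mp he
        · rw [if_neg hq]
          rw [ih (k0 + 1) (fun j hg => by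
            have := hf (j + 1) (by
              rw [show k0 + ((j + 1 : Nat) : Int) = k0 + 1 + j by push_cast; ring]
              exact hg)
            omega)]
          constructor
          · rintro ⟨j, h1, h2⟩
            refine ⟨j + 1, ?_, ?_⟩
            · rw [show k0 + ((j + 1 : Nat) : Int) = k0 + 1 + j by push_cast; ring]; exact h1
            · rw [show k0 + ((j + 1 : Nat) : Int) = k0 + 1 + j by push_cast; ring]; exact h2
          · rintro ⟨j, h1, h2⟩
            match j with
            | 0 => simp only [Nat.cast_zero, add_zero] at h2; exact absurd h2 hq
            | j + 1 =>
              refine ⟨j, ?_, ?_⟩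
              · rw [show k0 + 1 + (j : Int) = k0 + ((j + 1 : Nat) : Int) by push_cast; ring]; exact h1
              · rw [show k0 + 1 + (j : Int) = k0 + ((j + 1 : Nat) : Int) by push_cast; ring]; exact h2

-- the two ports agree on EVERY input (Pre_ is needed only for fidelity to the Pythons,
-- which raise IndexError outside it)
lemma dv_ports_eq (board : List String) (row col : Int) :
    diagnoal_verify board row col = diagnoal_verify_alt board row col := by
  set n := PySem.Str.len (board.headD "") with hn
  have key : diagnoal_verify board row col = false ↔ diagnoal_verify_alt board row col = false := by
    simp only [diagnoal_verify_alt]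
    rw [dvA_false_iff, ← hn,
      dvSweep_false_iff board n row col _ 0 (fun j hg => by
        have := dvGuard_bound n row col (0 + (j:Int)) hg
        have h0 : (0:Int) ≤ (j:Int) := Int.natCast_nonneg j
        omega),
      dvLoop1_false_iff, dvLoop2_false_iff, dvLoop3_false_iff, dvLoop4_false_iff]
    simp only [zero_add]
    constructor
    · rintro (⟨k, h1, h2, h3⟩ | ⟨k, h1, h2, h3⟩ | ⟨k, h1, h2, h3⟩ | ⟨k, h1, h2, h3⟩)
      · exact ⟨k, Or.inl ⟨h1, h2⟩,
          List.any_eq_true.mpr ⟨(row - k, col - k), dvArms_mem1 n row col k ⟨h1, h2⟩, h3⟩⟩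
      · exact ⟨k, Or.inr (Or.inl ⟨h1, h2⟩),
          List.any_eq_true.mpr ⟨(row + k, col + k), dvArms_mem2 n row col k ⟨h1, h2⟩, h3⟩⟩
      · exact ⟨k, Or.inr (Or.inr (Or.inl ⟨h1, h2⟩)),
          List.any_eq_true.mpr ⟨(row + k, col - k), dvArms_mem3 n row col k ⟨h1, h2⟩, h3⟩⟩
      · exact ⟨k, Or.inr (Or.inr (Or.inr ⟨h1, h2⟩)),
          List.any_eq_true.mpr ⟨(row - k, col + k), dvArms_mem4 n row col k ⟨h1, h2⟩, h3⟩⟩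
    · rintro ⟨j, _, hq⟩
      obtain ⟨⟨a, b⟩, hmem, hQ⟩ := List.any_eq_true.mp hq
      rcases dvArms_mem_elim n row col j a b hmem with
        ⟨⟨c1, c2⟩, ha, hb⟩ | ⟨⟨c1, c2⟩, ha, hb⟩ | ⟨⟨c1, c2⟩, ha, hb⟩ | ⟨⟨c1, c2⟩, ha, hb⟩
      · exact Or.inl ⟨j, c1, c2, by rw [ha, hb] at hQ; exact hQ⟩
      · exact Or.inr (Or.inl ⟨j, c1, c2, by rw [ha, hb] at hQ; exact hQ⟩)
      · exact Or.inr (Or.inr (Or.inl ⟨j, c1, c2, by rw [ha, hb] at hQ; exact hQ⟩))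
      · exact Or.inr (Or.inr (Or.inr ⟨j, c1, c2, by rw [ha, hb] at hQ; exact hQ⟩))
  cases hA : diagnoal_verify board row col <;> cases hB : diagnoal_verify_alt board row col <;>
    simp_all

-- ===== VERDICT (by name: the statement is the Claim_ definition above) =====
theorem diagnoal_verify_spec : Claim_equal_diagnoal_verify := by
  intro board row col _ _
  exact dv_ports_eq board row col
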